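-- pv_equiv track=rewrite | github.com/Arrbat/CRACKMES_WRITEUPS | EASY/tweetys_serialme by tweety100_by_crackmes.de/generate_serials.py | generate_serials
-- ===== SOURCE A (Python) =====
-- def generate_serials(name):
--     sum_ascii = sum(ord(c) for c in name)
--
--     firstSerial = (sum_ascii * 0x1f) // 0x275 + 0x2a5f828
--     while firstSerial > 999_999_999:
--         firstSerial //= 10
--
--     secondSerial = firstSerial * 0x52 - 3
--     while secondSerial > 99_999:
--         secondSerial //= 10
--
--     return firstSerial, secondSerial
-- ===== SOURCE B (Python) =====
-- def _clip(n, width):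
--     d = len(str(n))
--     return n // 10 ** (d - width) if d > width else n
--
--
-- def generate_serials(name):
--     total = sum(map(ord, name))
--     first = _clip(total * 0x1f // 0x275 + 0x2a5f828, 9)
--     second = _clip(first * 0x52 - 3, 5)
--     return first, second
-- ===== Notes on version B (the rewrite author's own statement) =====
-- stated objective: simpler
-- what changed: Each truncating while-loop (repeated //= 10 until the value fits 9 resp. 5 digits) is replaced by one decimal-length computation and a single floor division by the matching power of ten.
import Mathlib
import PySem

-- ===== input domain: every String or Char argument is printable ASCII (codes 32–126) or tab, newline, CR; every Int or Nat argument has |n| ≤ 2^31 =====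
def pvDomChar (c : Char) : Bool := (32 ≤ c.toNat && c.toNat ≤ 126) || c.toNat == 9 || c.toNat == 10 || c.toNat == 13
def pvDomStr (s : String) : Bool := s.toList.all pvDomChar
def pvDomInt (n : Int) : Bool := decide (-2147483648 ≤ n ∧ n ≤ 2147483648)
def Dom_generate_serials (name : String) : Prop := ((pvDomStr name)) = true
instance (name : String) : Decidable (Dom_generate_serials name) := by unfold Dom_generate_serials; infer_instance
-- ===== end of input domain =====

-- B replaces each truncating while-loop by one decimal-length computation and a single floor division (objective: simpler).

-- ===== PORT A =====
-- the `while x > bound: x //= 10` loop (bound a positive literal, so the loop only runs on positive x)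
def pyTruncPos (bound : Nat) (n : Int) : Int :=
  if (bound : Int) < n then pyTruncPos bound (PySem.Int.floordiv n 10) else n
termination_by n.toNat
decreasing_by
  rw [PySem.Int.floordiv_eq_ediv_of_pos (by norm_num)]
  omega

def generate_serials (name : String) : Int × Int :=
  let sum_ascii : Int := (name.toList.map (fun c => (c.toNat : Int))).sum
  let firstSerial := pyTruncPos 999999999 (PySem.Int.floordiv (sum_ascii * 31) 629 + 44431400)
  let secondSerial := pyTruncPos 99999 (firstSerial * 82 - 3)
  (firstSerial, secondSerial)

-- ===== PORT B =====
-- _clip(n, width): divide once by 10 ** (len(str(n)) - width) if str(n) is longer than width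
def clipWidth (n : Int) (width : Int) : Int :=
  let d := PySem.Str.len (PySem.Int.toStr n)
  if width < d then PySem.Int.floordiv n ((10 : Int) ^ (d - width).toNat) else n

def generate_serials_alt (name : String) : Int × Int :=
  let total : Int := (name.toList.map (fun c => (c.toNat : Int))).sum
  let first := clipWidth (PySem.Int.floordiv (total * 31) 629 + 44431400) 9
  let second := clipWidth (first * 82 - 3) 5
  (first, second)

-- ===== PRECONDITION & SPEC =====
def Spec_generate_serials (name : String) (out : Int × Int) : Prop := out = generate_serials_alt name
instance (name : String) (out : Int × Int) : Decidable (Spec_generate_serials name out) := by unfold Spec_generate_serials; infer_instance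

-- ===== CLAIM (what is proved, stated in full; the proofs are below) =====
def Claim_equal_generate_serials : Prop := ∀ (name : String), Dom_generate_serials name → Spec_generate_serials name (generate_serials name)

-- ===== LEMMAS AND PROOFS =====

-- exact length of Nat.toDigitsCore with sufficient fuel
lemma toDigitsCore_len : ∀ (f n : Nat) (l : List Char), n < f →
    (Nat.toDigitsCore 10 f n l).length = l.length + Nat.log 10 n + 1 := by
  intro f
  induction f with
  | zero => omega
  | succ f ih =>
    intro n l hn
    rw [Nat.toDigitsCore]
    by_cases h : n / 10 = 0
    · have hlog : Nat.log 10 n = 0 := Nat.log_eq_zero_iff.mpr (Or.inl (by omega))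
      simp [h, hlog]
    · have h10 : 10 ≤ n := by omega
      rw [if_neg h, ih (n / 10) _ (by omega), Nat.log_div_base]
      have : 1 ≤ Nat.log 10 n := Nat.log_pos (by norm_num) h10
      simp
      omega

lemma toDigits_len (m : Nat) : (Nat.toDigits 10 m).length = Nat.log 10 m + 1 := by
  rw [Nat.toDigits, toDigitsCore_len _ _ _ (by omega)]
  simp

-- decimal length of str(n) for positive n
lemma strLen_pos (n : Int) (hn : 0 < n) :
    PySem.Str.len (PySem.Int.toStr n) = (Nat.log 10 n.toNat + 1 : Nat) := by
  rw [PySem.Str.len_eq, PySem.Int.toList_toStr, PySem.Int.toChars, if_neg (by omega),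
    toDigits_len]

lemma pyTruncPos_ge_one (bound : Nat) (hb : 9 ≤ bound) :
    ∀ (n : Int), 1 ≤ n → 1 ≤ pyTruncPos bound n := by
  intro n
  induction n using pyTruncPos.induct bound with
  | case1 n h ih =>
    intro _
    rw [pyTruncPos, if_pos h]
    exact ih (by rw [PySem.Int.floordiv_eq_ediv_of_pos (by norm_num)]; omega)
  | case2 n h =>
    intro h1
    rw [pyTruncPos, if_neg h]
    exact h1

lemma pyTruncPos_eq_clip (k : Nat) (hk : 1 ≤ k) :
    ∀ (n : Int), 1 ≤ n → pyTruncPos (10 ^ k - 1) n = clipWidth n k := by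
  intro n
  induction n using pyTruncPos.induct (10 ^ k - 1) with
  | case1 n h ih =>
    intro hn
    have hbk : ((10 ^ k - 1 : Nat) : Int) = (10 : Int) ^ k - 1 := by
      rw [Nat.cast_sub (Nat.one_le_pow _ _ (by norm_num))]
      push_cast; ring
    have hge : (10 : Int) ^ k ≤ n := by rw [hbk] at h; omega
    have h10 : (10 : Int) ≤ n := le_trans (by
      calc (10:Int) = 10 ^ 1 := (pow_one _).symm
      _ ≤ 10 ^ k := pow_le_pow_right₀ (by norm_num) hk) hge
    have hdiv : PySem.Int.floordiv n 10 = n / 10 :=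
      PySem.Int.floordiv_eq_ediv_of_pos (by norm_num)
    rw [pyTruncPos, if_pos h, ih (by omega)]
    -- relate clip of n/10 to clip of n
    have hlogk : k ≤ Nat.log 10 n.toNat := by
      rw [Nat.le_log_iff_pow_le (by norm_num) (by omega)]
      omega
    have hlogdiv : Nat.log 10 (n / 10).toNat = Nat.log 10 n.toNat - 1 := by
      have : (n / 10).toNat = n.toNat / 10 := by omega
      rw [this, Nat.log_div_base]
    have hlog1 : 1 ≤ Nat.log 10 n.toNat := le_trans hk hlogk
    unfold clipWidth
    rw [hdiv, strLen_pos _ (by omega), strLen_pos _ (by omega), hlogdiv]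
    set L := Nat.log 10 n.toNat with hL
    by_cases hc : (k : Int) < ((L - 1 + 1 : Nat) : Int)
    · -- str(n/10) still longer than k: compose the two divisions
      rw [if_pos hc, if_pos (by push_cast at hc ⊢; omega)]
      have he : (((L - 1 + 1 : Nat) : Int) - k).toNat + 1 = (((L + 1 : Nat) : Int) - k).toNat := by
        push_cast at hc ⊢; omega
      rw [PySem.Int.floordiv_eq_ediv_of_pos (pow_pos (by norm_num) _),
          PySem.Int.floordiv_eq_ediv_of_pos (pow_pos (by norm_num) _),
          Int.ediv_ediv_of_nonneg (by norm_num), ← pow_succ', he]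
    · -- n/10 fits in k digits, and n had exactly k+1: one division by 10 each side
      rw [if_neg hc]
      have hLk : L = k := by push_cast at hc; omega
      rw [if_pos (by push_cast; omega)]
      have : ((((L + 1 : Nat) : Int)) - k).toNat = 1 := by push_cast; omega
      rw [this, pow_one, hdiv]
  | case2 n h =>
    intro hn
    -- n already ≤ bound: both sides return n
    have hbk : ((10 ^ k - 1 : Nat) : Int) = (10 : Int) ^ k - 1 := by
      rw [Nat.cast_sub (Nat.one_le_pow _ _ (by norm_num))]
      push_cast; ring
    have hlt : n < (10 : Int) ^ k := by rw [hbk] at h; omega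
    rw [pyTruncPos, if_neg h]
    unfold clipWidth
    rw [strLen_pos _ (by omega)]
    have hltn : n.toNat < 10 ^ k := by
      have h' : (n.toNat : Int) < ((10 ^ k : Nat) : Int) := by
        push_cast [Int.toNat_of_nonneg (by omega : (0 : Int) ≤ n)]
        exact hlt
      exact_mod_cast h'
    have : Nat.log 10 n.toNat < k := (Nat.log_lt_iff_lt_pow (by norm_num) (by omega)).mpr hltn
    rw [if_neg (by push_cast; omega)]

-- ===== VERDICT (by name: the statement is the Claim_ definition above) =====
theorem generate_serials_spec : Claim_equal_generate_serials := by
  intro name _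
  unfold Spec_generate_serials generate_serials generate_serials_alt
  have hsum : 0 ≤ (name.toList.map (fun c => (c.toNat : Int))).sum := by
    apply List.sum_nonneg
    intro x hx
    simp only [List.mem_map] at hx
    obtain ⟨c, _, rfl⟩ := hx
    positivity
  set s := (name.toList.map (fun c => (c.toNat : Int))).sum with hs
  have hf0 : 1 ≤ PySem.Int.floordiv (s * 31) 629 + 44431400 := by
    rw [PySem.Int.floordiv_eq_ediv_of_pos (by norm_num)]
    have : 0 ≤ s * 31 / 629 := Int.ediv_nonneg (by positivity) (by norm_num)
    omega
  have h1 : pyTruncPos 999999999 (PySem.Int.floordiv (s * 31) 629 + 44431400) =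
      clipWidth (PySem.Int.floordiv (s * 31) 629 + 44431400) 9 := by
    have := pyTruncPos_eq_clip 9 (by norm_num) _ hf0
    norm_num at this ⊢
    exact this
  have hfirst : 1 ≤ pyTruncPos 999999999 (PySem.Int.floordiv (s * 31) 629 + 44431400) := by
    have := pyTruncPos_ge_one 999999999 (by norm_num) _ hf0
    norm_num at this ⊢
    exact this
  have h2 : pyTruncPos 99999 (pyTruncPos 999999999 (PySem.Int.floordiv (s * 31) 629 + 44431400) * 82 - 3) =
      clipWidth (pyTruncPos 999999999 (PySem.Int.floordiv (s * 31) 629 + 44431400) * 82 - 3) 5 := by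
    have := pyTruncPos_eq_clip 5 (by norm_num)
      (pyTruncPos 999999999 (PySem.Int.floordiv (s * 31) 629 + 44431400) * 82 - 3) (by omega)
    norm_num at this ⊢
    exact this
  rw [h1] at h2
  simp only [h1, h2]
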